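-- pv_equiv track=rewrite | github.com/FernE047/pythonscript | imagem/morphManual/oldVersions/analisaEFazConfig (8).py | ordenaLinhaInd
-- ===== SOURCE A (Python) =====
-- from enum import Enum
--
-- CoordData = tuple[int, int]
--
-- class Direction(Enum):
--     DOWN_RIGHT = 0
--     DOWN = 1
--     DOWN_LEFT = 2
--     LEFT = 3
--     UP_LEFT = 4
--     UP = 5
--     UP_RIGHT = 6
--     RIGHT = 7
--
-- def apply_direction(coord: CoordData | None, direction: Direction) -> CoordData:
--     if coord is None:
--         raise ValueError("Coordinate cannot be None")
--     x, y = coord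
--     if direction == Direction.DOWN_RIGHT:
--         return (x + 1, y + 1)
--     if direction == Direction.DOWN:
--         return (x, y + 1)
--     if direction == Direction.DOWN_LEFT:
--         return (x - 1, y + 1)
--     if direction == Direction.LEFT:
--         return (x - 1, y)
--     if direction == Direction.UP_LEFT:
--         return (x - 1, y - 1)
--     if direction == Direction.UP:
--         return (x, y - 1)
--     if direction == Direction.UP_RIGHT:
--         return (x + 1, y - 1)
--     if direction == Direction.RIGHT:
--         return (x + 1, y)
--
-- def ordenaLinhaInd(linha: list[CoordData]) -> list[CoordData]:
--     tamanho = len(linha)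
--     maiorLinha: list[CoordData] = []
--     for n in range(tamanho):
--         linhaTeste = linha.copy()
--         primeiroPonto = linha[n]
--         linhaTeste = ordenaLinhaIt(linhaTeste, inicio=primeiroPonto)
--         if len(linhaTeste) == tamanho:
--             return linhaTeste
--         if len(linhaTeste) > len(maiorLinha):
--             maiorLinha = linhaTeste.copy()
--     return maiorLinha
--
-- def ordenaLinhaIt(
--     linhaDesordenada: list[CoordData],
--     anteriores: list[CoordData] | None = None,
--     inicio: CoordData | None = None,
-- ) -> list[CoordData]:
--     if inicio is None:
--         inicio = linhaDesordenada[0]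
--     if anteriores is None:
--         anteriores = [inicio]
--     linhaOrdenada = anteriores.copy()
--     pontoInicial = anteriores[-1]
--     anteriores = None
--     while True:
--         pontos: list[CoordData] = []
--         for d in Direction:
--             pontoAtual = apply_direction(pontoInicial, d)
--             if pontoAtual in linhaDesordenada:
--                 if pontoAtual not in linhaOrdenada:
--                     pontos.append(pontoAtual)
--         if len(pontos) == 0:
--             return linhaOrdenada
--         elif len(pontos) == 1:
--             pontoInicial = pontos[0]
--             linhaOrdenada.append(pontoInicial)
--         else:
--             linhaMaxima = linhaOrdenada.copy()
--             for ponto in pontos: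
--                 novaLinha = ordenaLinhaIt(
--                     linhaDesordenada, anteriores=linhaOrdenada + [ponto]
--                 )
--                 if len(novaLinha) == len(linhaDesordenada):
--                     return novaLinha
--                 if len(novaLinha) > len(linhaMaxima):
--                     linhaMaxima = novaLinha.copy()
--             return linhaMaxima
-- ===== SOURCE B (Python) =====
-- _DIRS = [(1, 1), (0, 1), (-1, 1), (-1, 0), (-1, -1), (0, -1), (1, -1), (1, 0)]
--
-- def _dfs(pts, n, path, cur):
--     best = path
--     for dx, dy in _DIRS:
--         p = (cur[0] + dx, cur[1] + dy)
--         if p in pts and p not in path: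
--             r = _dfs(pts, n, path + [p], p)
--             if len(r) == n:
--                 return r
--             if len(r) > len(best):
--                 best = r
--     return best
--
-- def ordenaLinhaInd(linha):
--     pts = set(linha)
--     n = len(linha)
--     best = []
--     for start in linha:
--         caminho = _dfs(pts, n, [start], start)
--         if len(caminho) == n:
--             return caminho
--         if len(caminho) > len(best):
--             best = caminho
--     return best
-- ===== Notes on version B (the rewrite author's own statement) =====
-- stated objective: faster
-- what changed: A's while-loop with a single-neighbor fast path plus a separate multi-neighbor branch recursion (and an optional-argument wrapper) is replaced by one uniform recursive DFS helper over the 8 directions from the current endpoint, with an O(1) set membership test instead of A's linear list scans, early-returning the first full-length extension and otherwise keeping the strictly-longest (earliest-tie) result.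
import Mathlib
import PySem

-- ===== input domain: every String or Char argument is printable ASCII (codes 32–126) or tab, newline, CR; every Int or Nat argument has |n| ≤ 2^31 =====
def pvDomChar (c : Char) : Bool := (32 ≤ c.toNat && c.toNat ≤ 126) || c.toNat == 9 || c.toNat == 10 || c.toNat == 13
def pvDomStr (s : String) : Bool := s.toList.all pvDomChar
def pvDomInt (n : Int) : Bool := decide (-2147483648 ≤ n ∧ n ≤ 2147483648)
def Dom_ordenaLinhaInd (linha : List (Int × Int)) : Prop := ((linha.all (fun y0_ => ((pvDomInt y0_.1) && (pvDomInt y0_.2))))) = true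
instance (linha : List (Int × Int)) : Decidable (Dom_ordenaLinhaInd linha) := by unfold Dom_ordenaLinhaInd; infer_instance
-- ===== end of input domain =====

-- B replaces A's while-loop with single-neighbor fast path plus separate branch recursion by one
-- uniform recursive DFS over the 8 directions with set membership instead of linear list scans
-- (objective: faster by the measured timing run; same return value).

-- ===== PORT A =====
-- the 8 Direction deltas in enum order (DOWN_RIGHT … RIGHT), as (dx, dy)
def pvDirs : List (Int × Int) :=
  [(1, 1), (0, 1), (-1, 1), (-1, 0), (-1, -1), (0, -1), (1, -1), (1, 0)]

-- `fuel` only totalizes the Python while/recursion (one unit per appended point; the wrapper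
-- passes tamanho + 1, more than any path can use, so exhaustion is never reached).
mutual
-- the `while True:` body of ordenaLinhaIt: linhaOrdenada, pontoInicial are the loop state
def pvLoopA (fuel : Nat) (ld : List (Int × Int)) (lo : List (Int × Int)) (pi : Int × Int) :
    List (Int × Int) :=
  match fuel with
  | 0 => lo
  | fuel + 1 =>
    let pontos := (pvDirs.map (fun d => (pi.1 + d.1, pi.2 + d.2))).filter
      (fun p => ld.contains p && !(lo.contains p))
    match pontos with
    | [] => lo
    | [p] => pvLoopA fuel ld (lo ++ [p]) p
    | ps =>
      -- `for ponto in pontos:` — the recursive call ordenaLinhaIt(ld, anteriores=lo+[ponto])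
      -- resolves its defaults to linhaOrdenada = lo++[ponto], pontoInicial = ponto
      pvBranchA fuel ld lo ps lo
  termination_by (fuel, 0)
-- the len(pontos) >= 2 arm: linhaMaxima accumulator over the branch points
def pvBranchA (fuel : Nat) (ld : List (Int × Int)) (lo : List (Int × Int))
    (ps : List (Int × Int)) (maxima : List (Int × Int)) : List (Int × Int) :=
  match ps with
  | [] => maxima
  | p :: rest =>
    let nova := pvLoopA fuel ld (lo ++ [p]) p
    if nova.length = ld.length then nova
    else if nova.length > maxima.length then pvBranchA fuel ld lo rest nova
    else pvBranchA fuel ld lo rest maxima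
  termination_by (fuel, ps.length + 1)
end

-- `for n in range(tamanho):` with maiorLinha accumulator; linha[n] enumerates linha's elements
def pvIndLoopA (fuel : Nat) (linha : List (Int × Int)) :
    List (Int × Int) → List (Int × Int) → List (Int × Int)
  | [], maior => maior
  | s :: rest, maior =>
    -- ordenaLinhaIt(linha.copy(), inicio=s): anteriores = [s], pontoInicial = s
    let linhaTeste := pvLoopA fuel linha [s] s
    if linhaTeste.length = linha.length then linhaTeste
    else if linhaTeste.length > maior.length then pvIndLoopA fuel linha rest linhaTeste
    else pvIndLoopA fuel linha rest maior

def ordenaLinhaInd (linha : List (Int × Int)) : List (Int × Int) :=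
  pvIndLoopA (linha.length + 1) linha linha []

-- ===== PORT B =====
-- B's _dfs: best accumulator, iterating the direction list with inline membership tests
mutual
def pvDfsB (fuel : Nat) (pts : PySem.Set (Int × Int)) (n : Nat) (path : List (Int × Int))
    (cur : Int × Int) : List (Int × Int) :=
  match fuel with
  | 0 => path
  | fuel + 1 => pvDfsFoldB fuel pts n path cur pvDirs path
  termination_by (fuel, 0)
def pvDfsFoldB (fuel : Nat) (pts : PySem.Set (Int × Int)) (n : Nat) (path : List (Int × Int))
    (cur : Int × Int) (ds : List (Int × Int)) (best : List (Int × Int)) : List (Int × Int) :=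
  match ds with
  | [] => best
  | d :: ds =>
    let p := (cur.1 + d.1, cur.2 + d.2)
    if PySem.Set.contains pts p && !(path.contains p) then
      let r := pvDfsB fuel pts n (path ++ [p]) p
      if r.length = n then r
      else if r.length > best.length then pvDfsFoldB fuel pts n path cur ds r
      else pvDfsFoldB fuel pts n path cur ds best
    else pvDfsFoldB fuel pts n path cur ds best
  termination_by (fuel, ds.length + 1)
end

-- `for start in linha:` with best accumulator
def pvIndLoopB (fuel : Nat) (pts : PySem.Set (Int × Int)) (n : Nat) :
    List (Int × Int) → List (Int × Int) → List (Int × Int)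
  | [], best => best
  | s :: rest, best =>
    let caminho := pvDfsB fuel pts n [s] s
    if caminho.length = n then caminho
    else if caminho.length > best.length then pvIndLoopB fuel pts n rest caminho
    else pvIndLoopB fuel pts n rest best

def ordenaLinhaInd_alt (linha : List (Int × Int)) : List (Int × Int) :=
  pvIndLoopB (linha.length + 1) (PySem.Set.ofList linha) linha.length linha []

-- ===== PRECONDITION & SPEC =====
def Spec_ordenaLinhaInd (linha : List (Int × Int)) (out : List (Int × Int)) : Prop := out = ordenaLinhaInd_alt linha
instance (linha : List (Int × Int)) (out : List (Int × Int)) : Decidable (Spec_ordenaLinhaInd linha out) := by unfold Spec_ordenaLinhaInd; infer_instance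

-- ===== CLAIM (what is proved, stated in full; the proofs are below) =====
def Claim_equal_ordenaLinhaInd : Prop := ∀ (linha : List (Int × Int)), Dom_ordenaLinhaInd linha → Spec_ordenaLinhaInd linha (ordenaLinhaInd linha)

-- ===== LEMMAS AND PROOFS =====

-- proof-side view of B's direction fold: the same fold over the already-filtered candidate points
def pvBranchB (fuel : Nat) (pts : PySem.Set (Int × Int)) (n : Nat) (path : List (Int × Int)) :
    List (Int × Int) → List (Int × Int) → List (Int × Int)
  | [], best => best
  | p :: rest, best =>
    let r := pvDfsB fuel pts n (path ++ [p]) p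
    if r.length = n then r
    else if r.length > best.length then pvBranchB fuel pts n path rest r
    else pvBranchB fuel pts n path rest best

theorem pvDfsB_len_ge (fuel : Nat) :
    ∀ (pts : PySem.Set (Int × Int)) (n : Nat) (path : List (Int × Int)) (cur : Int × Int),
      path.length ≤ (pvDfsB fuel pts n path cur).length := by
  induction fuel with
  | zero => intro pts n path cur; simp [pvDfsB]
  | succ fuel ih =>
    intro pts n path cur
    have aux : ∀ (ds best : List (Int × Int)), path.length ≤ best.length →
        path.length ≤ (pvDfsFoldB fuel pts n path cur ds best).length := by
      intro ds
      induction ds with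
      | nil => intro best h; simpa [pvDfsFoldB] using h
      | cons d ds ihds =>
        intro best h
        have hr := ih pts n (path ++ [(cur.1 + d.1, cur.2 + d.2)]) (cur.1 + d.1, cur.2 + d.2)
        simp only [List.length_append, List.length_cons, List.length_nil] at hr
        simp only [pvDfsFoldB]
        split
        · split
          · omega
          · split
            · exact ihds _ (by omega)
            · exact ihds _ h
        · exact ihds _ h
    simpa [pvDfsB] using aux pvDirs path le_rfl

theorem pv_cands_eq (ld lo : List (Int × Int)) (pi : Int × Int) :
    (pvDirs.map (fun d => (pi.1 + d.1, pi.2 + d.2))).filter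
        (fun p => ld.contains p && !(lo.contains p)) =
      (pvDirs.map (fun d => (pi.1 + d.1, pi.2 + d.2))).filter
        (fun p => PySem.Set.contains (PySem.Set.ofList ld) p && !(lo.contains p)) := by
  apply List.filter_congr
  intro p _
  have : PySem.Set.contains (PySem.Set.ofList ld) p = ld.contains p := by
    simp [PySem.Set.contains, PySem.Set.mem_ofList]
  rw [this]

theorem pvDfsFoldB_filter (fuel : Nat) (pts : PySem.Set (Int × Int)) (n : Nat)
    (path : List (Int × Int)) (cur : Int × Int) :
    ∀ (ds best : List (Int × Int)),
      pvDfsFoldB fuel pts n path cur ds best =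
        pvBranchB fuel pts n path
          ((ds.map (fun d => (cur.1 + d.1, cur.2 + d.2))).filter
            (fun p => PySem.Set.contains pts p && !(path.contains p))) best := by
  intro ds
  induction ds with
  | nil => intro best; simp [pvDfsFoldB, pvBranchB]
  | cons d ds ihds =>
    intro best
    simp only [pvDfsFoldB, List.map_cons, List.filter_cons]
    by_cases hc : (PySem.Set.contains pts (cur.1 + d.1, cur.2 + d.2) && !(path.contains (cur.1 + d.1, cur.2 + d.2))) = true
    · simp only [hc, if_true, pvBranchB]
      split
      · rfl
      · split
        · exact ihds _
        · exact ihds _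
    · simp only [Bool.not_eq_true] at hc
      simp only [hc, Bool.false_eq_true, if_false]
      exact ihds _

theorem pvLoopA_eq_dfsB (fuel : Nat) :
    ∀ (ld lo : List (Int × Int)) (pi : Int × Int),
      pvLoopA fuel ld lo pi = pvDfsB fuel (PySem.Set.ofList ld) ld.length lo pi := by
  induction fuel with
  | zero => intro ld lo pi; simp [pvLoopA, pvDfsB]
  | succ fuel ih =>
    intro ld lo pi
    have hbranch : ∀ (ps maxima : List (Int × Int)),
        pvBranchA fuel ld lo ps maxima =
          pvBranchB fuel (PySem.Set.ofList ld) ld.length lo ps maxima := by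
      intro ps
      induction ps with
      | nil => intro maxima; simp [pvBranchA, pvBranchB]
      | cons p rest ihp =>
        intro maxima
        simp only [pvBranchA, pvBranchB, ih]
        split
        · rfl
        · split
          · exact ihp _
          · exact ihp _
    have hB : pvDfsB (fuel + 1) (PySem.Set.ofList ld) ld.length lo pi =
        pvDfsFoldB fuel (PySem.Set.ofList ld) ld.length lo pi pvDirs lo := by
      simp [pvDfsB]
    rw [hB, pvDfsFoldB_filter, ← pv_cands_eq]
    simp only [pvLoopA, List.contains_eq_mem]
    rcases h : (pvDirs.map (fun d => (pi.1 + d.1, pi.2 + d.2))).filter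
        (fun p => decide (p ∈ ld) && !decide (p ∈ lo)) with _ | ⟨p, _ | ⟨q, rest⟩⟩
    · simp only [h]
      simp [pvBranchB]
    · -- single candidate: A chains, B folds once; B keeps r since it is longer than lo
      simp only [h]
      have hr := pvDfsB_len_ge fuel (PySem.Set.ofList ld) ld.length (lo ++ [p]) p
      simp only [List.length_append, List.length_cons, List.length_nil] at hr
      simp only [pvBranchB, ih]
      split
      · rfl
      · split
        · rfl
        · omega
    · simp only [h]
      exact hbranch _ _

theorem pvIndLoop_eq (fuel : Nat) (linha : List (Int × Int)) :
    ∀ (starts maior : List (Int × Int)),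
      pvIndLoopA fuel linha starts maior =
        pvIndLoopB fuel (PySem.Set.ofList linha) linha.length starts maior := by
  intro starts
  induction starts with
  | nil => intro maior; simp [pvIndLoopA, pvIndLoopB]
  | cons s rest ihs =>
    intro maior
    simp only [pvIndLoopA, pvIndLoopB, pvLoopA_eq_dfsB]
    split
    · rfl
    · split
      · exact ihs _
      · exact ihs _

-- ===== VERDICT (by name: the statement is the Claim_ definition above) =====
theorem ordenaLinhaInd_spec : Claim_equal_ordenaLinhaInd := by
  intro linha _
  show ordenaLinhaInd linha = ordenaLinhaInd_alt linha
  simp only [ordenaLinhaInd, ordenaLinhaInd_alt, pvIndLoop_eq]
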